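-- pv_equiv track=rewrite | github.com/DrBrundige/Magic-Processors | src/common_methods_processor_03.py | sort_cards_by_set_num
-- ===== SOURCE A (Python) =====
-- def sort_cards_by_set_num(all_cards):
-- 	sorted_cards = []
-- 	sorted_nums_ints = []
-- 	sorted_keys_strs = []
--
-- 	for card in all_cards:
-- 		# in_card = 'collect_number' in card
-- 		# num_is_digit = card["collector_number"].isdigit()
-- 		# num = card["collector_number"]
-- 		if card["collector_number"].isdigit():
-- 			sorted_nums_ints.append(card)
-- 		else:
-- 			sorted_keys_strs.append(card)
--
-- 	sorted_nums_ints.sort(key=sort_set_num_int)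
-- 	sorted_keys_strs.sort(key=sort_set_num_str)
--
-- 	for sorted_int in sorted_nums_ints:
-- 		sorted_cards.append(sorted_int)
--
-- 	for sorted_str in sorted_keys_strs:
-- 		sorted_cards.append(sorted_str)
--
-- 	return sorted_cards
--
-- def sort_set_num_str(card):
-- 	# if "collect_number" in card:
-- 	return card["collector_number"]
--
-- def sort_set_num_int(card):
-- 	# if "collect_number" in card.keys():
-- 	return int(card["collector_number"])
-- ===== SOURCE B (Python) =====
-- def sort_cards_by_set_num(all_cards):
-- 	def key(card):
-- 		num = card["collector_number"]
-- 		return (0, int(num)) if num.isdigit() else (1, num)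
-- 	return sorted(all_cards, key=key)
-- ===== Notes on version B (the rewrite author's own statement) =====
-- stated objective: simpler
-- what changed: Replaces the explicit partition loop, two separate sorts and two copy-append loops with a single stable sorted() call whose (tag, value) key puts all digit cards (by int value) before all other cards (by string).
import Mathlib
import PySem

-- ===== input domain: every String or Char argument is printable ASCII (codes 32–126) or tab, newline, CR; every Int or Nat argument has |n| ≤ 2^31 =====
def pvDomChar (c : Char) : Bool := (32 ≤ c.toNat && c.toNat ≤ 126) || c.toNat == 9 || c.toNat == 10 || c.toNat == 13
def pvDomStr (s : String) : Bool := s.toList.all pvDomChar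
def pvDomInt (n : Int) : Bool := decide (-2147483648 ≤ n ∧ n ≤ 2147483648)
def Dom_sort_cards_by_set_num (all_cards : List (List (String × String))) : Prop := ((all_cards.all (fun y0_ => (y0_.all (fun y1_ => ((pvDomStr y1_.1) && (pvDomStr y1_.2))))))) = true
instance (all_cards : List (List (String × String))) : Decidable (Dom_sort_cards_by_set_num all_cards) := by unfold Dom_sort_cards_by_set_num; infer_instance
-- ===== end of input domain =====

-- B replaces A's partition loop + two sorts + two copy loops by one stable sort with a lexicographic (tag, value) key; equal output proved on all inputs whose cards carry the "collector_number" key.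


-- ===== PORT A =====
-- card["collector_number"]; the KeyError case (key missing) is excluded by Pre_, so the default "" is never read
def pvCN (card : List (String × String)) : String :=
  (PySem.Dict.mk card).getD "collector_number" ""

-- sort_set_num_int: int(card["collector_number"]); called only on cards whose number .isdigit(), where int() succeeds, so getD 0 is never read
def sort_set_num_int (card : List (String × String)) : Int :=
  (PySem.Int.ofStr? (pvCN card)).getD 0

-- sort_set_num_str
def sort_set_num_str (card : List (String × String)) : String := pvCN card

def sort_cards_by_set_num (all_cards : List (List (String × String))) : List (List (String × String)) :=
  let part := all_cards.foldl
    (fun (acc : List (List (String × String)) × List (List (String × String))) card =>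
      if PySem.Str.strIsdigit (pvCN card) then (acc.1 ++ [card], acc.2) else (acc.1, acc.2 ++ [card]))
    ([], [])
  let sorted_nums_ints := PySem.List.sorted part.1 sort_set_num_int
  let sorted_keys_strs := PySem.List.sorted part.2 sort_set_num_str
  let sorted_cards := sorted_nums_ints.foldl (fun acc c => acc ++ [c]) ([] : List (List (String × String)))
  let sorted_cards := sorted_keys_strs.foldl (fun acc c => acc ++ [c]) sorted_cards
  sorted_cards

-- ===== PORT B =====
-- Source B's key: (0, int(num)) for digit numbers, (1, num) otherwise — a lexicographic sum key (Lex (Int ⊕ String) is exactly Python's tuple order here, the tags never tie across the two shapes)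
def pvAltKey (card : List (String × String)) : Lex (Int ⊕ String) :=
  if PySem.Str.strIsdigit (pvCN card)
  then toLex (Sum.inl ((PySem.Int.ofStr? (pvCN card)).getD 0))
  else toLex (Sum.inr (pvCN card))

def sort_cards_by_set_num_alt (all_cards : List (List (String × String))) : List (List (String × String)) :=
  PySem.List.sorted all_cards pvAltKey

-- ===== PRECONDITION & SPEC =====
-- Pre_ excludes exactly the inputs where some card lacks the "collector_number" key, on which Python A raises KeyError
def Pre_sort_cards_by_set_num (all_cards : List (List (String × String))) : Prop :=
  ∀ card ∈ all_cards, (PySem.Dict.mk card).contains "collector_number" = true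
instance (all_cards : List (List (String × String))) : Decidable (Pre_sort_cards_by_set_num all_cards) := by unfold Pre_sort_cards_by_set_num; infer_instance

def pvWitness_sort_cards_by_set_num : (List (List (String × String))) :=
  [[("collector_number", "12"), ("name", "a")], [("collector_number", "X1")], [("collector_number", "9")]]

def Spec_sort_cards_by_set_num (all_cards : List (List (String × String))) (out : List (List (String × String))) : Prop := out = sort_cards_by_set_num_alt all_cards
instance (all_cards : List (List (String × String))) (out : List (List (String × String))) : Decidable (Spec_sort_cards_by_set_num all_cards out) := by unfold Spec_sort_cards_by_set_num; infer_instance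

-- ===== CLAIM (what is proved, stated in full; the proofs are below) =====
def Claim_equal_sort_cards_by_set_num : Prop := ∀ (all_cards : List (List (String × String))), Dom_sort_cards_by_set_num all_cards → Pre_sort_cards_by_set_num all_cards → Spec_sort_cards_by_set_num all_cards (sort_cards_by_set_num all_cards)

-- ===== LEMMAS AND PROOFS =====

-- inserting x into u ++ v lands in v when nothing of u goes after x
lemma insertBy_append_of_not_before {α : Type} (before : α → α → Bool) (x : α) (u v : List α)
    (h : ∀ y ∈ u, before x y = false) :
    PySem.List.insertBy before x (u ++ v) = u ++ PySem.List.insertBy before x v := by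
  induction u with
  | nil => simp
  | cons y u ih =>
    have hy := h y (by simp)
    simp [PySem.List.insertBy, hy, ih (fun z hz => h z (by simp [hz]))]

-- inserting x into u ++ v lands in u when everything of v goes after x
lemma insertBy_append_of_before {α : Type} (before : α → α → Bool) (x : α) (u v : List α)
    (h : ∀ y ∈ v, before x y = true) :
    PySem.List.insertBy before x (u ++ v) = PySem.List.insertBy before x u ++ v := by
  induction u with
  | nil =>
    cases v with
    | nil => simp
    | cons z v => simp [PySem.List.insertBy, h z (by simp)]
  | cons y u ih =>
    by_cases hy : before x y = true
    · simp [PySem.List.insertBy, hy]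
    · simp only [Bool.not_eq_true] at hy
      simp [PySem.List.insertBy, hy, ih]

-- insertBy only looks at 'before x ·' on the members of ys
lemma insertBy_congr {α : Type} (before before' : α → α → Bool) (x : α) (ys : List α)
    (h : ∀ y ∈ ys, before x y = before' x y) :
    PySem.List.insertBy before x ys = PySem.List.insertBy before' x ys := by
  induction ys with
  | nil => rfl
  | cons y ys ih =>
    have hy := h y (by simp)
    simp only [PySem.List.insertBy, hy, ih (fun z hz => h z (by simp [hz]))]

-- the heart of the equivalence: one stable sort under the lexicographic sum key
-- equals (stable sort of the digit cards by int) ++ (stable sort of the rest by string)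
lemma sorted_altKey_split (xs : List (List (String × String))) :
    PySem.List.sorted xs pvAltKey =
      PySem.List.sorted (xs.filter (fun c => PySem.Str.strIsdigit (pvCN c))) sort_set_num_int ++
      PySem.List.sorted (xs.filter (fun c => !PySem.Str.strIsdigit (pvCN c))) sort_set_num_str := by
  induction xs using List.reverseRecOn with
  | nil => rfl
  | append_singleton xs x ih =>
    simp only [PySem.List.sorted_eq_foldl_insertBy, List.foldl_append, List.foldl_cons,
      List.foldl_nil, List.filter_append, List.filter_cons, List.filter_nil] at ih ⊢
    by_cases hx : PySem.Chars.strIsdigit (pvCN x).toList = true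
    · rw [ih, insertBy_append_of_before _ x _ _ (by
        intro y hy
        rw [← PySem.List.sorted_eq_foldl_insertBy, PySem.List.mem_sorted] at hy
        have hyd := List.of_mem_filter hy
        simp only [Bool.not_eq_true', PySem.Str.strIsdigit] at hyd
        simp [pvAltKey, hx, hyd])]
      rw [insertBy_congr (fun a b => decide (pvAltKey a < pvAltKey b))
            (fun a b => decide (sort_set_num_int a < sort_set_num_int b)) x _ (by
        intro y hy
        rw [← PySem.List.sorted_eq_foldl_insertBy, PySem.List.mem_sorted] at hy
        have hyd := List.of_mem_filter hy
        simp only [PySem.Str.strIsdigit] at hyd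
        simp [pvAltKey, hx, hyd, sort_set_num_int])]
      simp [hx]
    · simp only [Bool.not_eq_true] at hx
      rw [ih, insertBy_append_of_not_before _ x _ _ (by
        intro y hy
        rw [← PySem.List.sorted_eq_foldl_insertBy, PySem.List.mem_sorted] at hy
        have hyd := List.of_mem_filter hy
        simp only [PySem.Str.strIsdigit] at hyd
        simp [pvAltKey, hx, hyd])]
      rw [insertBy_congr (fun a b => decide (pvAltKey a < pvAltKey b))
            (fun a b => decide (sort_set_num_str a < sort_set_num_str b)) x _ (by
        intro y hy
        rw [← PySem.List.sorted_eq_foldl_insertBy, PySem.List.mem_sorted] at hy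
        have hyd := List.of_mem_filter hy
        simp only [Bool.not_eq_true', PySem.Str.strIsdigit] at hyd
        simp [pvAltKey, hx, hyd, sort_set_num_str])]
      simp [hx]

-- A's partition loop computes the two filters
lemma partition_foldl_eq (xs : List (List (String × String)))
    (a b : List (List (String × String))) :
    xs.foldl (fun (acc : List (List (String × String)) × List (List (String × String))) card =>
        if PySem.Str.strIsdigit (pvCN card) then (acc.1 ++ [card], acc.2) else (acc.1, acc.2 ++ [card]))
      (a, b)
    = (a ++ xs.filter (fun c => PySem.Str.strIsdigit (pvCN c)),
       b ++ xs.filter (fun c => !PySem.Str.strIsdigit (pvCN c))) := by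
  induction xs generalizing a b with
  | nil => simp
  | cons x xs ih =>
    simp only [PySem.Str.strIsdigit] at ih
    by_cases hx : PySem.Chars.strIsdigit (pvCN x).toList = true
    · simp [hx, ih, List.append_assoc]
    · simp only [Bool.not_eq_true] at hx
      simp [hx, ih, List.append_assoc]

-- ===== VERDICT (by name: the statement is the Claim_ definition above) =====
theorem sort_cards_by_set_num_spec : Claim_equal_sort_cards_by_set_num := by
  intro all_cards _ _
  unfold Spec_sort_cards_by_set_num sort_cards_by_set_num sort_cards_by_set_num_alt
  rw [partition_foldl_eq all_cards [] []]
  simp only [List.nil_append, PySem.List.foldl_append_singleton]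
  rw [sorted_altKey_split]
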